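-- pv_equiv track=rewrite | github.com/lavkushry/ELKChatbot | prompt_builder.py | _format_fields_for_prompt
-- ===== SOURCE A (Python) =====
-- from typing import Dict, Any, List
--
-- def _format_fields_for_prompt(fields: List[str]) -> str:
--     """Format fields in a readable way for the prompt"""
--     if not fields:
--         return "No fields available"
--
--     # Group fields by top-level category
--     grouped = {}
--     for field in fields:
--         top_level = field.split('.')[0]
--         if top_level not in grouped:
--             grouped[top_level] = []
--         grouped[top_level].append(field)
--
--     formatted = []
--     for category, field_list in sorted(grouped.items()):
--         if len(field_list) <= 3:
--             formatted.append(f"- {category}: {', '.join(field_list)}")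
--         else:
--             main_fields = [f for f in field_list if not f.endswith('.keyword')][:3]
--             formatted.append(f"- {category}: {', '.join(main_fields)}...")
--
--     return '\n'.join(formatted)
-- ===== SOURCE B (Python) =====
-- from typing import Dict, Any, List
--
-- def _format_fields_for_prompt(fields: List[str]) -> str:
--     """Format fields in a readable way for the prompt"""
--     if not fields:
--         return "No fields available"
--
--     lines = []
--     for category in sorted({f.split('.')[0] for f in fields}):
--         field_list = [f for f in fields if f.split('.')[0] == category]
--         if len(field_list) <= 3:
--             lines.append(f"- {category}: {', '.join(field_list)}")
--         else:
--             main_fields = [f for f in field_list if not f.endswith('.keyword')][:3]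
--             lines.append(f"- {category}: {', '.join(main_fields)}...")
--     return '\n'.join(lines)
-- ===== Notes on version B (the rewrite author's own statement) =====
-- stated objective: simpler
-- what changed: Replaces the incremental dict-accumulation grouping with sorting the set of distinct top-level categories and filtering the input list once per category.
import Mathlib
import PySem

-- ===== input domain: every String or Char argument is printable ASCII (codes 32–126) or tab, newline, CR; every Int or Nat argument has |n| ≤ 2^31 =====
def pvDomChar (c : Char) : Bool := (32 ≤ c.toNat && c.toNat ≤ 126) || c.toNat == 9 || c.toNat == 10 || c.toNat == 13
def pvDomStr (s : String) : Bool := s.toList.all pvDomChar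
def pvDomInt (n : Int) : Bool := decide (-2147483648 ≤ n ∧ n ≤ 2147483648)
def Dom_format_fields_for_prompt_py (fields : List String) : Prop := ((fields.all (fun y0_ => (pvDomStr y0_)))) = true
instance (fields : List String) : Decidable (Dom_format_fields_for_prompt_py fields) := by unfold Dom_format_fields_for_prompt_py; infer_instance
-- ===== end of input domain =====

-- B replaces A's incremental dict grouping with sorting the distinct categories and filtering per category (simpler decomposition, no speed claim).

-- ===== PORT A =====
-- shared helper: field.split('.')[0] (split with nonempty sep always returns a nonempty list)
def pvTop (f : String) : String :=
  match PySem.Str.split? f "." with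
  | some (h :: _) => h
  | _ => ""

-- shared helper: the identical formatting line both Pythons produce for one category
def pvFmt (category : String) (field_list : List String) : String :=
  if field_list.length ≤ 3 then
    "- " ++ category ++ ": " ++ PySem.Str.join ", " field_list
  else
    "- " ++ category ++ ": " ++
      PySem.Str.join ", " ((field_list.filter (fun f => !PySem.Str.endswith f ".keyword")).take 3) ++ "..."

def format_fields_for_prompt_py (fields : List String) : String :=
  if fields = [] then "No fields available"
  else
    let grouped : PySem.Dict String (List String) :=
      fields.foldl (fun d f =>
        let top_level := pvTop f
        let d := if d.contains top_level then d else d.insert top_level []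
        d.modify top_level [] (fun l => l ++ [f])) PySem.Dict.empty
    -- sorted(grouped.items()): dict keys are distinct, so Python's tuple comparison
    -- never reaches the second component; sorting by the key is exact here
    let formatted :=
      (PySem.List.sorted grouped.items (fun p => p.1) false).foldl
        (fun acc p => acc ++ [pvFmt p.1 p.2]) []
    PySem.Str.join "\n" formatted

-- ===== PORT B =====
def format_fields_for_prompt_py_alt (fields : List String) : String :=
  if fields = [] then "No fields available"
  else
    let lines :=
      (PySem.List.sorted (PySem.Set.ofList (fields.map pvTop)) (fun c => c) false).foldl
        (fun acc category =>
          acc ++ [pvFmt category (fields.filter (fun f => pvTop f == category))]) []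
    PySem.Str.join "\n" lines

-- ===== PRECONDITION & SPEC =====
def Spec_format_fields_for_prompt_py (fields : List String) (out : String) : Prop := out = format_fields_for_prompt_py_alt fields
instance (fields : List String) (out : String) : Decidable (Spec_format_fields_for_prompt_py fields out) := by unfold Spec_format_fields_for_prompt_py; infer_instance

-- ===== CLAIM (what is proved, stated in full; the proofs are below) =====
def Claim_equal_format_fields_for_prompt_py : Prop := ∀ (fields : List String), Dom_format_fields_for_prompt_py fields → Spec_format_fields_for_prompt_py fields (format_fields_for_prompt_py fields)

-- ===== LEMMAS AND PROOFS =====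

-- A's two-step "ensure key, then append" equals a single modify-with-default
lemma pv_step_eq (d : PySem.Dict String (List String)) (f : String) :
    (let top_level := pvTop f
     let d := if d.contains top_level then d else d.insert top_level []
     d.modify top_level [] (fun l => l ++ [f])) =
    d.modify (pvTop f) [] (fun l => l ++ [f]) := by
  by_cases h : d.contains (pvTop f) = true
  · simp [h]
  · simp only [Bool.not_eq_true] at h
    simp [h, PySem.Dict.modify, PySem.Dict.getD_insert_self,
      PySem.Dict.insert_insert_self, PySem.Dict.getD_of_not_contains]

-- A's grouping dict, characterised: its items are the distinct categories in
-- first-occurrence order, each paired with the filter of the input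
lemma pv_items_eq (fields : List String) :
    (fields.foldl (fun d f =>
        let top_level := pvTop f
        let d := if d.contains top_level then d else d.insert top_level []
        d.modify top_level [] (fun l => l ++ [f])) PySem.Dict.empty).items =
    (PySem.Set.ofList (fields.map pvTop)).map
      (fun c => (c, fields.filter (fun f => pvTop f == c))) := by
  rw [PySem.List.foldl_congr_mem fields _
        (fun d f => d.modify (pvTop f) [] (fun l => l ++ [f])) PySem.Dict.empty
        (fun acc x _ => pv_step_eq acc x)]
  have hD : fields.foldl (fun d f => d.modify (pvTop f) [] (fun l => l ++ [f]))
        PySem.Dict.empty =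
      (fields.map (fun f => (pvTop f, f))).foldl
        (fun d p => d.modify p.1 [] (fun x => x ++ [p.2])) PySem.Dict.empty := by
    rw [List.foldl_map]
  have hkeys : (fields.foldl (fun d f => d.modify (pvTop f) [] (fun l => l ++ [f]))
        PySem.Dict.empty).keys = PySem.Set.ofList (fields.map pvTop) := by
    rw [PySem.Dict.keys_foldl_modify_key fields pvTop [] (fun _ f l => l ++ [f])]
    simp [PySem.Set.update, PySem.Set.ofList, PySem.Dict.keys_empty]
  have hget : ∀ c, (fields.foldl (fun d f => d.modify (pvTop f) [] (fun l => l ++ [f]))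
        PySem.Dict.empty).getD c [] = fields.filter (fun f => pvTop f == c) := by
    intro c
    rw [hD, PySem.Dict.getD_foldl_modify_append]
    simp [PySem.Dict.getD_empty, List.filter_map, List.map_map, Function.comp_def]
  rw [PySem.Dict.items_eq_map_keys _ (hkeys ▸ PySem.Set.nodup_ofList (fields.map pvTop)) [],
    hkeys]
  exact List.map_congr_left (fun c _ => by rw [hget c])

-- sorting the pairs by their (distinct) first components = sorting the categories and mapping
lemma pv_sorted_map (cats : List String) (h : cats.Nodup)
    (g : String → String × List String) (hg : ∀ c, (g c).1 = c) :
    PySem.List.sorted (cats.map g) (fun p => p.1) false =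
      (PySem.List.sorted cats (fun c => c) false).map g := by
  apply PySem.List.sorted_eq_of_perm_of_pairwise_lt
  · exact (PySem.List.sorted_perm cats (fun c => c) false).map g
  · rw [List.pairwise_map]
    have hp := PySem.List.sorted_pairwise cats (fun c => c)
    have hn : (PySem.List.sorted cats (fun c => c) false).Nodup :=
      ((PySem.List.sorted_perm cats (fun c => c) false).symm).nodup h
    exact (hp.and hn).imp (fun hab => by rw [hg, hg]; exact lt_of_le_of_ne hab.1 hab.2)

-- ===== VERDICT (by name: the statement is the Claim_ definition above) =====
theorem format_fields_for_prompt_py_spec : Claim_equal_format_fields_for_prompt_py := by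
  intro fields _
  unfold Spec_format_fields_for_prompt_py format_fields_for_prompt_py
    format_fields_for_prompt_py_alt
  by_cases h : fields = []
  · simp [h]
  · simp only [if_neg h, pv_items_eq, PySem.List.foldl_append_singleton_eq_map]
    rw [pv_sorted_map (PySem.Set.ofList (fields.map pvTop))
      (PySem.Set.nodup_ofList (fields.map pvTop))
      (fun c => (c, fields.filter (fun f => pvTop f == c))) (fun c => rfl)]
    simp [List.map_map, Function.comp_def]
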